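-- pv_equiv track=rewrite | github.com/SimPet01/protein-mutation-analyzer | scripts/analyzer.py | get_aa_group
-- ===== SOURCE A (Python) =====
-- def get_aa_group(aa):
--     """
--     Classify amino acid into chemical group based on properties.
--
--     Categorization based on physicochemical properties:
--     - Hydrophobic: Non-polar amino acids with hydrophobic side chains
--     - Polar: Polar uncharged amino acids
--     - Charged+: Basic (positively charged at pH 7)
--     - Charged-: Acidic (negatively charged at pH 7)
--     - Special: Glycine (smallest, most flexible)
--
--     Args:
--         aa: Single letter amino acid code
--
--     Returns:
--         str: Name of the group the amino acid belongs to
--     """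
--     groups = {
--         'Hydrophobic': ['A', 'V', 'I', 'L', 'M', 'F', 'W', 'P'],
--         'Polar': ['S', 'T', 'C', 'Y', 'N', 'Q'],
--         'Charged+': ['K', 'R', 'H'],
--         'Charged-': ['D', 'E'],
--         'Special': ['G']
--     }
--
--     for group, members in groups.items():
--         if aa in members:
--             return group
--     return 'Unknown'
-- ===== SOURCE B (Python) =====
-- _AA_TO_GROUP = {
--     'A': 'Hydrophobic', 'V': 'Hydrophobic', 'I': 'Hydrophobic', 'L': 'Hydrophobic',
--     'M': 'Hydrophobic', 'F': 'Hydrophobic', 'W': 'Hydrophobic', 'P': 'Hydrophobic',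
--     'S': 'Polar', 'T': 'Polar', 'C': 'Polar', 'Y': 'Polar', 'N': 'Polar', 'Q': 'Polar',
--     'K': 'Charged+', 'R': 'Charged+', 'H': 'Charged+',
--     'D': 'Charged-', 'E': 'Charged-',
--     'G': 'Special',
-- }
--
--
-- def get_aa_group(aa):
--     """Classify amino acid into chemical group via a direct letter->group lookup."""
--     return _AA_TO_GROUP.get(aa, 'Unknown')
-- ===== Notes on version B (the rewrite author's own statement) =====
-- stated objective: simpler
-- what changed: Replaces A's loop over a group->members dict with per-group membership scans by a single precomputed letter-to-group reverse dict and one .get call with a default.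
import Mathlib
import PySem

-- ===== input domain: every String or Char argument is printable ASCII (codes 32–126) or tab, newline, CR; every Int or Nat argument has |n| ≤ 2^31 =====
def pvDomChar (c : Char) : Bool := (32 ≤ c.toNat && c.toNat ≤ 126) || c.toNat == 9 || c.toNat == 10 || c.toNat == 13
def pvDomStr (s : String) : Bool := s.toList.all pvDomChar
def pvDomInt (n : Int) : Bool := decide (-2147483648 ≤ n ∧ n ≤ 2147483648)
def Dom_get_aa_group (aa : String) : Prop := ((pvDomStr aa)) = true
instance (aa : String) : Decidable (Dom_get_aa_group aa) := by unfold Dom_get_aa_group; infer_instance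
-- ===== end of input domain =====

-- B replaces A's scan over the group->members table by one precomputed letter->group reverse lookup (objective: simpler).


-- ===== PORT A =====
-- the groups dict, in insertion order
def pvGroupsA : PySem.Dict String (List String) := PySem.Dict.ofList
  [("Hydrophobic", ["A", "V", "I", "L", "M", "F", "W", "P"]),
   ("Polar", ["S", "T", "C", "Y", "N", "Q"]),
   ("Charged+", ["K", "R", "H"]),
   ("Charged-", ["D", "E"]),
   ("Special", ["G"])]

-- the 'for group, members in groups.items(): if aa in members: return group' loop with early return
def pvGroupLoop (aa : String) : List (String × List String) → String
  | [] => "Unknown"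
  | (group, members) :: rest => if aa ∈ members then group else pvGroupLoop aa rest

def get_aa_group (aa : String) : String :=
  pvGroupLoop aa (PySem.Dict.items pvGroupsA)

-- ===== PORT B =====
def pvAaToGroup : PySem.Dict String String := PySem.Dict.ofList
  [("A", "Hydrophobic"), ("V", "Hydrophobic"), ("I", "Hydrophobic"), ("L", "Hydrophobic"),
   ("M", "Hydrophobic"), ("F", "Hydrophobic"), ("W", "Hydrophobic"), ("P", "Hydrophobic"),
   ("S", "Polar"), ("T", "Polar"), ("C", "Polar"), ("Y", "Polar"), ("N", "Polar"), ("Q", "Polar"),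
   ("K", "Charged+"), ("R", "Charged+"), ("H", "Charged+"),
   ("D", "Charged-"), ("E", "Charged-"),
   ("G", "Special")]

def get_aa_group_alt (aa : String) : String :=
  PySem.Dict.getD pvAaToGroup aa "Unknown"

-- ===== PRECONDITION & SPEC =====
def Spec_get_aa_group (aa : String) (out : String) : Prop := out = get_aa_group_alt aa
instance (aa : String) (out : String) : Decidable (Spec_get_aa_group aa out) := by unfold Spec_get_aa_group; infer_instance

-- ===== CLAIM (what is proved, stated in full; the proofs are below) =====
def Claim_equal_get_aa_group : Prop := ∀ (aa : String), Dom_get_aa_group aa → Spec_get_aa_group aa (get_aa_group aa)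

-- ===== LEMMAS AND PROOFS =====

-- ===== VERDICT (by name: the statement is the Claim_ definition above) =====
theorem get_aa_group_spec : Claim_equal_get_aa_group := by
  intro aa _
  unfold Spec_get_aa_group
  by_cases hA : aa = "A"
  · subst hA; decide
  by_cases hV : aa = "V"
  · subst hV; decide
  by_cases hI : aa = "I"
  · subst hI; decide
  by_cases hL : aa = "L"
  · subst hL; decide
  by_cases hM : aa = "M"
  · subst hM; decide
  by_cases hF : aa = "F"
  · subst hF; decide
  by_cases hW : aa = "W"
  · subst hW; decide
  by_cases hP : aa = "P"
  · subst hP; decide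
  by_cases hS : aa = "S"
  · subst hS; decide
  by_cases hT : aa = "T"
  · subst hT; decide
  by_cases hC : aa = "C"
  · subst hC; decide
  by_cases hY : aa = "Y"
  · subst hY; decide
  by_cases hN : aa = "N"
  · subst hN; decide
  by_cases hQ : aa = "Q"
  · subst hQ; decide
  by_cases hK : aa = "K"
  · subst hK; decide
  by_cases hR : aa = "R"
  · subst hR; decide
  by_cases hH : aa = "H"
  · subst hH; decide
  by_cases hD : aa = "D"
  · subst hD; decide
  by_cases hE : aa = "E"
  · subst hE; decide
  by_cases hG : aa = "G"
  · subst hG; decide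
  simp [get_aa_group, get_aa_group_alt, pvGroupsA, pvAaToGroup, pvGroupLoop,
    PySem.Dict.ofList, PySem.Dict.update, PySem.Dict.empty, PySem.Dict.insert, PySem.Dict.contains, List.find?, Option.map, PySem.Dict.items, PySem.Dict.getD, PySem.Dict.get?, List.lookup, hA, hV, hI, hL, hM, hF, hW, hP, hS, hT, hC, hY, hN, hQ, hK, hR, hH, hD, hE, hG,
    (show ("A" == aa) = false by simp [Ne.symm hA]), (show ("V" == aa) = false by simp [Ne.symm hV]), (show ("I" == aa) = false by simp [Ne.symm hI]), (show ("L" == aa) = false by simp [Ne.symm hL]), (show ("M" == aa) = false by simp [Ne.symm hM]), (show ("F" == aa) = false by simp [Ne.symm hF]), (show ("W" == aa) = false by simp [Ne.symm hW]), (show ("P" == aa) = false by simp [Ne.symm hP]), (show ("S" == aa) = false by simp [Ne.symm hS]), (show ("T" == aa) = false by simp [Ne.symm hT]), (show ("C" == aa) = false by simp [Ne.symm hC]), (show ("Y" == aa) = false by simp [Ne.symm hY]), (show ("N" == aa) = false by simp [Ne.symm hN]), (show ("Q" == aa) = false by simp [Ne.symm hQ]), (show ("K" == aa) = false by simp [Ne.symm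 hK]), (show ("R" == aa) = false by simp [Ne.symm hR]), (show ("H" == aa) = false by simp [Ne.symm hH]), (show ("D" == aa) = false by simp [Ne.symm hD]), (show ("E" == aa) = false by simp [Ne.symm hE]), (show ("G" == aa) = false by simp [Ne.symm hG])]
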